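-- pv_equiv track=rewrite | github.com/ArsanAbdi/iut_final | OTHERS/EXO1_advent_code.py | clef_generateur
-- ===== SOURCE A (Python) =====
-- from typing import Generator, List
--
-- def clef_generateur(quantite: int, valeur_depart: int, facteur: int, diviseur: int = 2147483647, multiple = 1) -> Generator[int, None, None]:
-- 	"""
-- 	Génère une séquence de clés à partir d'une valeur de départ, d'un facteur multiplicatif et d'un diviseur.
--
-- 	Args:
-- 		quantite (int): Le nombre de clés à générer.
-- 		valeur_depart (int): La valeur de départ pour la génération des clés.
-- 		facteur (int): Le facteur multiplicatif pour générer les clés.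
-- 		diviseur (int): Le diviseur pour générer les clés.
--
-- 	Yields:
-- 		Generator[int, None, None]: Un générateur produisant la séquence de clés générées.
-- 	"""
-- 	valeur_actuel = valeur_depart
-- 	compteur = 0
--
-- 	while compteur < quantite:
-- 		valeur_actuel = valeur_actuel * facteur % diviseur
--
-- 		if valeur_actuel % multiple == 0:
-- 			compteur += 1
-- 			yield valeur_actuel
-- ===== SOURCE B (Python) =====
-- from itertools import count
--
-- def clef_generateur(quantite: int, valeur_depart: int, facteur: int, diviseur: int = 2147483647, multiple = 1):
--     """Each key is obtained from its closed form valeur_depart * facteur**k (mod diviseur)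
--     by modular exponentiation over the step index k, instead of carrying the PRNG state
--     through a recurrence; the remaining quota counts down."""
--     restant = quantite
--     for k in count(1):
--         if restant <= 0:
--             return
--         v = valeur_depart * pow(facteur, k, diviseur) % diviseur
--         if v % multiple == 0:
--             restant -= 1
--             yield v
-- ===== Notes on version B (the rewrite author's own statement) =====
-- stated objective: alternative
-- what changed: B computes each raw key by its closed form valeur_depart * pow(facteur, k, diviseur) % diviseur (modular exponentiation over the step index k) instead of carrying the PRNG state through the recurrence, and counts the remaining quota down instead of a compteur up.
import Mathlib
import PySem

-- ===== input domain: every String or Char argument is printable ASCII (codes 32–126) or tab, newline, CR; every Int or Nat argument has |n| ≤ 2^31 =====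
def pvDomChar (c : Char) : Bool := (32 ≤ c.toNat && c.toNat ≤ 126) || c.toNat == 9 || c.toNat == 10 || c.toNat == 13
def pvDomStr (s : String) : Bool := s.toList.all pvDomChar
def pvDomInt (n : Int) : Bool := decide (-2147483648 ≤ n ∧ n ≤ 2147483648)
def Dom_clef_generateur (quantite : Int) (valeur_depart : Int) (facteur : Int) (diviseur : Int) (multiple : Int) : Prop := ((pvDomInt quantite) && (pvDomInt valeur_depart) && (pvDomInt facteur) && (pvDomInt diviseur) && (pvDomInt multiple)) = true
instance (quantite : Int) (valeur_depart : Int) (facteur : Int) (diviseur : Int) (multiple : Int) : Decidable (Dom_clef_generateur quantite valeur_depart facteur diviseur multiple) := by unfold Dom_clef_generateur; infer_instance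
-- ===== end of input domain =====

-- B replaces A's carried-state recurrence by the per-index closed form
-- valeur_depart * pow(facteur, k, diviseur) % diviseur, counting the remaining quota down;
-- equivalence is about the list of yielded values. On inputs where the filter never admits
-- enough values neither Python generator finishes; both ports bound the loop by
-- |diviseur|·(quantite+1) steps, past the point where any finishing run of either Python
-- has produced its last key (the orbit of x ↦ x*facteur % diviseur has cycled by then).

-- ===== PORT A =====
def clefA_loop (fuel : Nat) (quantite : Int) (valeur : Int) (facteur : Int) (diviseur : Int) (multiple : Int) (compteur : Int) (acc : List Int) : List Int :=
  match fuel with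
  | 0 => acc.reverse
  | fuel + 1 =>
    if compteur < quantite then
      let v := PySem.Int.mod (valeur * facteur) diviseur
      if PySem.Int.mod v multiple == 0 then
        clefA_loop fuel quantite v facteur diviseur multiple (compteur + 1) (v :: acc)
      else
        clefA_loop fuel quantite v facteur diviseur multiple compteur acc
    else acc.reverse

def clef_generateur (quantite : Int) (valeur_depart : Int) (facteur : Int) (diviseur : Int) (multiple : Int) : List Int :=
  clefA_loop (diviseur.natAbs * (quantite.toNat + 1)) quantite valeur_depart facteur diviseur multiple 0 []

-- ===== PORT B =====
-- pow(facteur, k, diviseur): square-and-multiply modular exponentiation (what CPython's pow does); exact for diviseur ≠ 0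
def pvPowMod (b : Int) (e : Nat) (m : Int) : Int :=
  if h : e = 0 then PySem.Int.mod 1 m
  else
    let half := pvPowMod (PySem.Int.mod (b * b) m) (e / 2) m
    if e % 2 = 1 then PySem.Int.mod (half * b) m else half
decreasing_by exact Nat.div_lt_self (Nat.pos_of_ne_zero h) (by omega)

def clefB_loop (fuel : Nat) (k : Nat) (restant : Int) (valeur_depart : Int) (facteur : Int) (diviseur : Int) (multiple : Int) (acc : List Int) : List Int :=
  match fuel with
  | 0 => acc.reverse
  | fuel + 1 =>
    if restant ≤ 0 then acc.reverse
    else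
      let v := PySem.Int.mod (valeur_depart * pvPowMod facteur k diviseur) diviseur
      if PySem.Int.mod v multiple == 0 then
        clefB_loop fuel (k + 1) (restant - 1) valeur_depart facteur diviseur multiple (v :: acc)
      else
        clefB_loop fuel (k + 1) restant valeur_depart facteur diviseur multiple acc

def clef_generateur_alt (quantite : Int) (valeur_depart : Int) (facteur : Int) (diviseur : Int) (multiple : Int) : List Int :=
  clefB_loop (diviseur.natAbs * (quantite.toNat + 1)) 1 quantite valeur_depart facteur diviseur multiple []

-- ===== PRECONDITION & SPEC =====
-- Pre_ excludes exactly the inputs on which Python A raises ZeroDivisionError: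
-- quantite > 0 together with diviseur = 0 or multiple = 0.
def Pre_clef_generateur (quantite : Int) (valeur_depart : Int) (facteur : Int) (diviseur : Int) (multiple : Int) : Prop :=
  quantite ≤ 0 ∨ (diviseur ≠ 0 ∧ multiple ≠ 0)
instance (quantite : Int) (valeur_depart : Int) (facteur : Int) (diviseur : Int) (multiple : Int) : Decidable (Pre_clef_generateur quantite valeur_depart facteur diviseur multiple) := by unfold Pre_clef_generateur; infer_instance

def pvWitness_clef_generateur : Int × Int × Int × Int × Int := (5, 3, 7, 11, 1)

def Spec_clef_generateur (quantite : Int) (valeur_depart : Int) (facteur : Int) (diviseur : Int) (multiple : Int) (out : List Int) : Prop := out = clef_generateur_alt quantite valeur_depart facteur diviseur multiple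
instance (quantite : Int) (valeur_depart : Int) (facteur : Int) (diviseur : Int) (multiple : Int) (out : List Int) : Decidable (Spec_clef_generateur quantite valeur_depart facteur diviseur multiple out) := by unfold Spec_clef_generateur; infer_instance

-- ===== CLAIM (what is proved, stated in full; the proofs are below) =====
def Claim_equal_clef_generateur : Prop := ∀ (quantite : Int) (valeur_depart : Int) (facteur : Int) (diviseur : Int) (multiple : Int), Dom_clef_generateur quantite valeur_depart facteur diviseur multiple → Pre_clef_generateur quantite valeur_depart facteur diviseur multiple → Spec_clef_generateur quantite valeur_depart facteur diviseur multiple (clef_generateur quantite valeur_depart facteur diviseur multiple)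

-- ===== LEMMAS AND PROOFS =====

-- Python's % depends only on the residue class: d ∣ a - b → a % d = b % d
theorem pvModCongr {d : Int} (hd : d ≠ 0) {a b : Int} (h : d ∣ a - b) :
    PySem.Int.mod a d = PySem.Int.mod b d := by
  obtain ⟨t, ht⟩ := h
  have ha := PySem.Int.floordiv_mul_add_mod a d
  have hb := PySem.Int.floordiv_mul_add_mod b d
  have hdiff : PySem.Int.mod a d - PySem.Int.mod b d
      = d * (t - PySem.Int.floordiv a d + PySem.Int.floordiv b d) := by
    linear_combination ht + ha - hb
  rcases lt_or_gt_of_ne hd with hneg | hpos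
  · have h1 := PySem.Int.mod_neg_bounds a hneg
    have h2 := PySem.Int.mod_neg_bounds b hneg
    set K := t - PySem.Int.floordiv a d + PySem.Int.floordiv b d with hK
    have hk1 : K < 1 := by nlinarith [hdiff, h1.1, h1.2, h2.1, h2.2]
    have hk2 : -1 < K := by nlinarith [hdiff, h1.1, h1.2, h2.1, h2.2]
    have hK0 : K = 0 := by omega
    rw [hK0, mul_zero] at hdiff
    omega
  · have h1a := PySem.Int.mod_nonneg a hpos
    have h1b := PySem.Int.mod_lt a hpos
    have h2a := PySem.Int.mod_nonneg b hpos
    have h2b := PySem.Int.mod_lt b hpos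
    set K := t - PySem.Int.floordiv a d + PySem.Int.floordiv b d with hK
    have hk1 : K < 1 := by nlinarith [hdiff]
    have hk2 : -1 < K := by nlinarith [hdiff]
    have hK0 : K = 0 := by omega
    rw [hK0, mul_zero] at hdiff
    omega

theorem pvModIdem {d : Int} (hd : d ≠ 0) (a : Int) :
    PySem.Int.mod (PySem.Int.mod a d) d = PySem.Int.mod a d := by
  apply pvModCongr hd
  exact ⟨-(PySem.Int.floordiv a d), by linear_combination PySem.Int.floordiv_mul_add_mod a d⟩

theorem pvModMulLeft {d : Int} (hd : d ≠ 0) (a c : Int) :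
    PySem.Int.mod (PySem.Int.mod a d * c) d = PySem.Int.mod (a * c) d := by
  apply pvModCongr hd
  exact ⟨-(PySem.Int.floordiv a d) * c, by linear_combination c * PySem.Int.floordiv_mul_add_mod a d⟩

theorem pvModMulRight {d : Int} (hd : d ≠ 0) (a c : Int) :
    PySem.Int.mod (a * PySem.Int.mod c d) d = PySem.Int.mod (a * c) d := by
  apply pvModCongr hd
  exact ⟨-(PySem.Int.floordiv c d) * a, by linear_combination a * PySem.Int.floordiv_mul_add_mod c d⟩

theorem pvModPow {d : Int} (hd : d ≠ 0) (a : Int) :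
    ∀ n : Nat, PySem.Int.mod (PySem.Int.mod a d ^ n) d = PySem.Int.mod (a ^ n) d := by
  intro n
  induction n with
  | zero => simp
  | succ n ih =>
    rw [pow_succ, pvModMulRight hd _ a, ← pvModMulLeft hd (PySem.Int.mod a d ^ n) a, ih,
      pvModMulLeft hd, ← pow_succ]

theorem pvPowMod_eq {d : Int} (hd : d ≠ 0) :
    ∀ (e : Nat) (b : Int), pvPowMod b e d = PySem.Int.mod (b ^ e) d := by
  intro e
  induction e using Nat.strong_induction_on with
  | _ e ih =>
    intro b
    rw [pvPowMod]
    by_cases he : e = 0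
    · simp [he]
    · have h2 : e / 2 < e := Nat.div_lt_self (Nat.pos_of_ne_zero he) (by omega)
      have hh : pvPowMod (PySem.Int.mod (b * b) d) (e / 2) d
          = PySem.Int.mod ((b * b) ^ (e / 2)) d := by
        rw [ih _ h2, pvModPow hd]
      have hbb : (b * b) ^ (e / 2) = b ^ (2 * (e / 2)) := by
        rw [← sq, ← pow_mul]
      rw [dif_neg he]
      simp only [hh, hbb]
      by_cases hodd : e % 2 = 1
      · have he2 : 2 * (e / 2) + 1 = e := by omega
        rw [if_pos hodd, pvModMulLeft hd, ← pow_succ, he2]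
      · have he2 : 2 * (e / 2) = e := by omega
        rw [if_neg hodd, he2]

-- the two loops walk in lockstep: A's carried state v lies in the residue class of s·f^k
theorem pvLoopEq (q s f d m : Int) (hd : d ≠ 0) :
    ∀ (fuel : Nat) (k : Nat) (v c : Int) (acc : List Int),
      PySem.Int.mod v d = PySem.Int.mod (s * f ^ k) d →
      clefA_loop fuel q v f d m c acc = clefB_loop fuel (k + 1) (q - c) s f d m acc := by
  intro fuel
  induction fuel with
  | zero => intro k v c acc _; simp [clefA_loop, clefB_loop]
  | succ fuel ih =>
    intro k v c acc hv
    by_cases hc : c < q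
    · have hb : ¬ (q - c ≤ 0) := by omega
      have hvA : PySem.Int.mod (v * f) d = PySem.Int.mod (s * f ^ (k + 1)) d := by
        rw [← pvModMulLeft hd v f, hv, pvModMulLeft hd, mul_assoc, ← pow_succ]
      have hvB : PySem.Int.mod (s * pvPowMod f (k + 1) d) d
          = PySem.Int.mod (s * f ^ (k + 1)) d := by
        rw [pvPowMod_eq hd, pvModMulRight hd]
      simp only [clefA_loop, clefB_loop, if_pos hc, if_neg hb, hvA, hvB]
      by_cases hyield : (PySem.Int.mod (PySem.Int.mod (s * f ^ (k + 1)) d) m == 0) = true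
      · rw [if_pos hyield, if_pos hyield,
          show q - c - 1 = q - (c + 1) by ring]
        exact ih (k + 1) _ (c + 1) _ (pvModIdem hd _)
      · rw [if_neg hyield, if_neg hyield]
        exact ih (k + 1) _ c acc (pvModIdem hd _)
    · have hb : q - c ≤ 0 := by omega
      simp [clefA_loop, clefB_loop, hc, hb]

theorem pvA_nil (fuel : Nat) (q v f d m : Int) (hq : q ≤ 0) :
    clefA_loop fuel q v f d m 0 [] = [] := by
  have h : ¬ ((0:Int) < q) := by omega
  cases fuel <;> simp [clefA_loop, h]

theorem pvB_nil (fuel k : Nat) (q s f d m : Int) (hq : q ≤ 0) :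
    clefB_loop fuel k q s f d m [] = [] := by
  cases fuel <;> simp [clefB_loop, hq]

-- ===== VERDICT (by name: the statement is the Claim_ definition above) =====
theorem clef_generateur_spec : Claim_equal_clef_generateur := by
  intro q s f d m _ hpre
  unfold Spec_clef_generateur clef_generateur clef_generateur_alt
  by_cases hq : q ≤ 0
  · rw [pvA_nil _ _ _ _ _ _ hq, pvB_nil _ _ _ _ _ _ _ hq]
  · have hd : d ≠ 0 := by
      rcases hpre with h | ⟨hd, _⟩
      · omega
      · exact hd
    have := pvLoopEq q s f d m hd (d.natAbs * (q.toNat + 1)) 0 s 0 []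
      (by simp)
    simpa using this
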